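-- pv_equiv track=rewrite | github.com/nortikin/sverchok | nodes/list_masks/mask_convert.py | by_face
-- ===== SOURCE A (Python) =====
-- def by_face(faces_mask, verts, edges, faces, include_partial):
--     indicies = set()
--     for m, face in zip(faces_mask, faces):
--         if m:
--             indicies.update(set(face))
--     verts_mask = [i in indicies for i in range(len(verts))]
--
--     if include_partial:
--         edges_mask = [any(v in indicies for v in edge) for edge in edges]
--     else:
--         selected_edges = set()
--         for is_selected_face, face in zip(faces_mask, faces):
--             if is_selected_face:
--                 for face_edge in walk_face(face):
--                     selected_edges.add(face_edge)
--         edges_mask = [tuple(sorted(edge)) in selected_edges for edge in edges]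
--
--     return verts_mask, edges_mask
--
-- def walk_face(face, from_edge=None, return_sorted=True):
--     # yields all edges in a face
--     # face direction has matter
--     # from_edge should be not sorted
--     first_indexes = list(range(len(face)))
--     second_indexes = list(range(1, len(face))) + [0]
--     if from_edge:
--         start_index = face.index(from_edge[0])
--         first_indexes = first_indexes[start_index:] + first_indexes[:start_index]
--         second_indexes = second_indexes[start_index:] + second_indexes[:start_index]
--     for i1, i2 in zip(first_indexes, second_indexes):
--         if return_sorted:
--             yield tuple(sorted([face[i1], face[i2]]))
--         else:
--             yield face[i1], face[i2]
-- ===== SOURCE B (Python) =====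
-- def by_face(faces_mask, verts, edges, faces, include_partial):
--     sel = set()
--     for m, face in zip(faces_mask, faces):
--         if m:
--             sel.update(face)
--
--     n = len(verts)
--     verts_mask = [False] * n
--     for v in sel:
--         if 0 <= v < n:
--             verts_mask[v] = True
--
--     if include_partial:
--         edges_mask = [not sel.isdisjoint(edge) for edge in edges]
--     else:
--         table = {}
--         for j, edge in enumerate(edges):
--             table.setdefault(tuple(sorted(edge)), []).append(j)
--         edges_mask = [False] * len(edges)
--         for m, face in zip(faces_mask, faces):
--             if m:
--                 for a, b in zip(face, face[1:] + face[:1]):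
--                     for j in table.get(tuple(sorted((a, b))), ()):
--                         edges_mask[j] = True
--
--     return verts_mask, edges_mask
-- ===== Notes on version B (the rewrite author's own statement) =====
-- stated objective: alternative
-- what changed: B inverts every traversal: vertices are marked into a preallocated mask by iterating the selected-vertex set (instead of testing each index against the set), and for the exact-edge branch B builds a dict from each mesh edge's sorted key to the list of its indices once, then walks each selected face's edges and marks every matched index True (instead of building a set of face-edge keys and testing every mesh edge against it); the partial branch uses set.isdisjoint instead of a generator-any.
import Mathlib
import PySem

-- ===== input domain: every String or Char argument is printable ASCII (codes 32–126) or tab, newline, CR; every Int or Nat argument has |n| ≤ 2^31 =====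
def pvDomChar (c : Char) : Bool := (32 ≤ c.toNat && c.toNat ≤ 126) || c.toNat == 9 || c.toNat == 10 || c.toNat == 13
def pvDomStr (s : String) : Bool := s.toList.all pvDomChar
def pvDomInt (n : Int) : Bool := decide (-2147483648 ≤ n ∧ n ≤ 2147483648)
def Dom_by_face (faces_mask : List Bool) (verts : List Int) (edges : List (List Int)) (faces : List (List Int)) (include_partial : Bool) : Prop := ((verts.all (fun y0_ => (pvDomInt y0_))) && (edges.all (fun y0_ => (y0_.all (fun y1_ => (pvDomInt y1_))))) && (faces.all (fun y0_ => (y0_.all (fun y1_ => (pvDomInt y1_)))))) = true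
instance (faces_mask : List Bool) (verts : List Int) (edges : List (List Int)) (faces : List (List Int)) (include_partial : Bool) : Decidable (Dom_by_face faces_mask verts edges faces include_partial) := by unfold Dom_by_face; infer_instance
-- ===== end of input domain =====

-- B replaces A's build-set-then-test passes by index-then-mark traversals (vertex marking, an edge-key index table); alternative decomposition, same cost class.


-- ===== PORT A =====
-- walk_face on A's call path (from_edge = None, return_sorted = True);
-- the pyGetD default 0 is never read: all generated indices are in range.
def walkFace (face : List Int) : List (List Int) :=
  let first_indexes := PySem.List.pyRange 0 (face.length : Int) 1
  let second_indexes := PySem.List.pyRange 1 (face.length : Int) 1 ++ [0]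
  (first_indexes.zip second_indexes).map (fun p =>
    PySem.List.sorted [PySem.List.pyGetD face p.1 0, PySem.List.pyGetD face p.2 0] (fun x => x) false)

def by_face (faces_mask : List Bool) (verts : List Int) (edges : List (List Int)) (faces : List (List Int)) (include_partial : Bool) : List Bool × List Bool :=
  let indicies : PySem.Set Int := (faces_mask.zip faces).foldl
    (fun s p => if p.1 then PySem.Set.update s (PySem.Set.ofList p.2) else s) PySem.Set.empty
  let verts_mask := (PySem.List.pyRange 0 (verts.length : Int) 1).map
    (fun i => PySem.Set.contains indicies i)
  if include_partial then
    (verts_mask, edges.map (fun edge => edge.any (fun v => PySem.Set.contains indicies v)))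
  else
    let selected_edges : PySem.Set (List Int) := (faces_mask.zip faces).foldl
      (fun s p => if p.1 then PySem.Set.update s (walkFace p.2) else s) PySem.Set.empty
    (verts_mask, edges.map (fun edge =>
      PySem.Set.contains selected_edges (PySem.List.sorted edge (fun x => x) false)))

-- ===== PORT B =====
def by_face_alt (faces_mask : List Bool) (verts : List Int) (edges : List (List Int)) (faces : List (List Int)) (include_partial : Bool) : List Bool × List Bool :=
  let sel : PySem.Set Int := (faces_mask.zip faces).foldl
    (fun s p => if p.1 then PySem.Set.update s p.2 else s) PySem.Set.empty
  let n := verts.length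
  -- 'for v in sel: …' marks True only, so the result is independent of the set's iteration order
  let verts_mask := sel.foldl
    (fun m v => if 0 ≤ v ∧ v < (n : Int) then m.set v.toNat true else m) (List.replicate n false)
  if include_partial then
    (verts_mask, edges.map (fun edge => !(edge.all (fun v => !(PySem.Set.contains sel v)))))
  else
    let table : PySem.Dict (List Int) (List Int) := (PySem.List.enumerate edges 0).foldl
      (fun d p => d.modify (PySem.List.sorted p.2 (fun x => x) false) [] (fun l => l ++ [p.1]))
      PySem.Dict.empty
    let edges_mask := (faces_mask.zip faces).foldl (fun m p =>
      if p.1 then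
        (p.2.zip (PySem.List.slice p.2 (some 1) none ++ PySem.List.slice p.2 none (some 1))).foldl
          (fun m q =>
            (table.getD (PySem.List.sorted [q.1, q.2] (fun x => x) false) []).foldl
              (fun m j => m.set j.toNat true) m) m
      else m) (List.replicate edges.length false)
    (verts_mask, edges_mask)

-- ===== PRECONDITION & SPEC =====
def Spec_by_face (faces_mask : List Bool) (verts : List Int) (edges : List (List Int)) (faces : List (List Int)) (include_partial : Bool) (out : List Bool × List Bool) : Prop := out = by_face_alt faces_mask verts edges faces include_partial
instance (faces_mask : List Bool) (verts : List Int) (edges : List (List Int)) (faces : List (List Int)) (include_partial : Bool) (out : List Bool × List Bool) : Decidable (Spec_by_face faces_mask verts edges faces include_partial out) := by unfold Spec_by_face; infer_instance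

-- ===== CLAIM (what is proved, stated in full; the proofs are below) =====
def Claim_equal_by_face : Prop := ∀ (faces_mask : List Bool) (verts : List Int) (edges : List (List Int)) (faces : List (List Int)) (include_partial : Bool), Dom_by_face faces_mask verts edges faces include_partial → Spec_by_face faces_mask verts edges faces include_partial (by_face faces_mask verts edges faces include_partial)

-- ===== LEMMAS AND PROOFS =====

theorem mem_sel_fold {α β : Type} [BEq α] [LawfulBEq α] (pairs : List (Bool × β)) (g : β → List α)
    (s : PySem.Set α) (x : α) :
    (x ∈ pairs.foldl (fun s p => if p.1 then PySem.Set.update s (g p.2) else s) s) ↔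
      x ∈ s ∨ ∃ p ∈ pairs, p.1 = true ∧ x ∈ g p.2 := by
  induction pairs generalizing s with
  | nil => simp
  | cons p ps ih =>
    cases hp : p.1
    · simp only [List.foldl_cons, hp, if_false, ih, List.mem_cons, Bool.false_eq_true]
      constructor
      · rintro (h | ⟨q, hq, h1, h2⟩)
        · exact Or.inl h
        · exact Or.inr ⟨q, Or.inr hq, h1, h2⟩
      · rintro (h | ⟨q, rfl | hq, h1, h2⟩)
        · exact Or.inl h
        · rw [hp] at h1; cases h1
        · exact Or.inr ⟨q, hq, h1, h2⟩
    · simp only [List.foldl_cons, hp, if_true, ih, PySem.Set.mem_update, List.mem_cons]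
      constructor
      · rintro ((h | h) | ⟨q, hq, h1, h2⟩)
        · exact Or.inl h
        · exact Or.inr ⟨p, Or.inl rfl, hp, h⟩
        · exact Or.inr ⟨q, Or.inr hq, h1, h2⟩
      · rintro (h | ⟨q, rfl | hq, h1, h2⟩)
        · exact Or.inl (Or.inl h)
        · exact Or.inl (Or.inr h2)
        · exact Or.inr ⟨q, hq, h1, h2⟩

theorem mark_getElem? (js : List Nat) (m : List Bool) (i : Nat) :
    (js.foldl (fun m j => m.set j true) m)[i]? = m[i]?.map (fun b => b || decide (i ∈ js)) := by
  induction js generalizing m with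
  | nil => cases h : m[i]? <;> simp [h]
  | cons j js ih =>
    simp only [List.foldl_cons, ih, List.getElem?_set]
    by_cases hji : j = i
    · subst hji
      by_cases hl : j < m.length
      · have : m[j]? = some m[j] := List.getElem?_eq_getElem hl
        simp [hl]
      · have : m[j]? = none := List.getElem?_eq_none (by omega)
        simp [hl]
    · simp [hji, List.mem_cons, Ne.symm hji]

theorem mark_length (js : List Nat) (m : List Bool) :
    (js.foldl (fun m j => m.set j true) m).length = m.length := by
  induction js generalizing m with
  | nil => rfl
  | cons j js ih => simp [List.foldl_cons, ih]

theorem markInt_getElem? (js : List Int) (m : List Bool) (i : Nat)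
    (h : ∀ j ∈ js, 0 ≤ j) :
    (js.foldl (fun m j => m.set j.toNat true) m)[i]? = m[i]?.map (fun b => b || decide ((i : Int) ∈ js)) := by
  have h1 : js.foldl (fun m j => m.set j.toNat true) m
      = (js.map Int.toNat).foldl (fun m j => m.set j true) m := by
    rw [List.foldl_map]
  rw [h1, mark_getElem?]
  have h2 : (i ∈ js.map Int.toNat) ↔ ((i : Int) ∈ js) := by
    constructor
    · rintro hm
      rcases List.mem_map.mp hm with ⟨j, hj, rfl⟩
      have := h j hj
      have : ((j.toNat : Int)) = j := Int.toNat_of_nonneg this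
      rw [this]; exact hj
    · intro hm
      exact List.mem_map.mpr ⟨(i : Int), hm, by simp⟩
  simp [h2]

theorem markInt_length (js : List Int) (m : List Bool) :
    (js.foldl (fun m j => m.set j.toNat true) m).length = m.length := by
  have h1 : js.foldl (fun m j => m.set j.toNat true) m
      = (js.map Int.toNat).foldl (fun m j => m.set j true) m := by
    rw [List.foldl_map]
  rw [h1, mark_length]

theorem walkFace_eq (f : List Int) :
    walkFace f = (f.zip (PySem.List.slice f (some 1) none ++ PySem.List.slice f none (some 1))).map
      (fun q => PySem.List.sorted [q.1, q.2] (fun x => x) false) := by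
  by_cases hn : f.length = 0
  · rw [List.eq_nil_of_length_eq_zero hn]; rfl
  · rw [PySem.List.slice_from_one]
    have hto : PySem.List.slice f none (some 1) = f.take 1 := by simp [pysem]
    rw [hto]
    have len1 : (PySem.List.pyRange 0 (f.length : Int) 1).length = f.length := by simp [pysem]
    have len2 : (PySem.List.pyRange 1 (f.length : Int) 1).length = f.length - 1 := by simp [pysem]
    unfold walkFace
    apply List.ext_getElem
    · simp only [List.length_map, List.length_zip, List.length_append, len1, len2,
        List.length_tail, List.length_take, List.length_singleton]
      omega
    · intro i h1 h2
      simp only [List.length_map, List.length_zip, List.length_append, len1, len2,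
        List.length_tail, List.length_take, List.length_singleton] at h1 h2
      have hi : i < f.length := by omega
      rw [List.getElem_map, List.getElem_map, List.getElem_zip, List.getElem_zip]
      have e1 : (PySem.List.pyRange 0 (f.length : Int) 1)[i]'(by omega) = ((i : Nat) : Int) := by
        rw [PySem.List.getElem_pyRange_one]; ring
      have eg1 : PySem.List.pyGetD f ((i : Nat) : Int) 0 = f[i] := by
        rw [PySem.List.pyGetD_natCast, List.getD_eq_getElem?_getD, List.getElem?_eq_getElem hi]; rfl
      by_cases hlt : i < f.length - 1
      · have e2 : (PySem.List.pyRange 1 (f.length : Int) 1 ++ [(0 : Int)])[i]'(by simp only [List.length_append, len2, List.length_singleton]; omega)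
            = (((i + 1 : Nat)) : Int) := by
          rw [List.getElem_append_left (by omega)]
          rw [PySem.List.getElem_pyRange_one]; push_cast; ring
        have eg2 : PySem.List.pyGetD f (((i + 1 : Nat)) : Int) 0 = f[i + 1]'(by omega) := by
          rw [PySem.List.pyGetD_natCast, List.getD_eq_getElem?_getD, List.getElem?_eq_getElem (by omega)]; rfl
        have e3 : (f.tail ++ List.take 1 f)[i]'(by simp only [List.length_append, List.length_tail, List.length_take]; omega)
            = f[i + 1]'(by omega) := by
          rw [List.getElem_append_left (by simp only [List.length_tail]; omega)]
          simp [List.getElem_tail]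
        rw [e1, e2, eg1, eg2, e3]
      · have e2 : (PySem.List.pyRange 1 (f.length : Int) 1 ++ [(0 : Int)])[i]'(by simp only [List.length_append, len2, List.length_singleton]; omega)
            = ((0 : Nat) : Int) := by
          rw [List.getElem_append_right (by omega)]
          simp
        have eg2 : PySem.List.pyGetD f ((0 : Nat) : Int) 0 = f[0]'(by omega) := by
          rw [PySem.List.pyGetD_natCast, List.getD_eq_getElem?_getD, List.getElem?_eq_getElem (by omega)]; rfl
        have e3 : (f.tail ++ List.take 1 f)[i]'(by simp only [List.length_append, List.length_tail, List.length_take]; omega)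
            = f[0]'(by omega) := by
          rw [List.getElem_append_right (by simp only [List.length_tail]; omega)]
          simp only [List.length_tail]
          have : i - (f.length - 1) = 0 := by omega
          simp [this, List.getElem_take]
        rw [e1, e2, eg1, eg2, e3]

theorem mem_tableGetD (edges : List (List Int)) (c : List Int) (j : Int) :
    (j ∈ ((PySem.List.enumerate edges 0).foldl
        (fun d p => d.modify (PySem.List.sorted p.2 (fun x => x) false) [] (fun l => l ++ [p.1]))
        PySem.Dict.empty).getD c [])
      ↔ ∃ (k : Nat) (h : k < edges.length), j = (k : Int) ∧
          PySem.List.sorted (edges[k]'h) (fun x => x) false = c := by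
  have hm : (PySem.List.enumerate edges 0).foldl
        (fun d p => d.modify (PySem.List.sorted p.2 (fun x => x) false) [] (fun l => l ++ [p.1]))
        PySem.Dict.empty
      = ((PySem.List.enumerate edges 0).map (fun p => (PySem.List.sorted p.2 (fun x => x) false, p.1))).foldl
        (fun d q => d.modify q.1 [] (fun l => l ++ [q.2])) PySem.Dict.empty := by
    rw [List.foldl_map]
  rw [hm, PySem.Dict.getD_foldl_modify_append]
  simp only [PySem.Dict.getD_empty, List.nil_append]
  constructor
  · intro hj
    rcases List.mem_map.mp hj with ⟨q, hq, rfl⟩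
    rcases List.mem_filter.mp hq with ⟨hq1, hq2⟩
    rcases List.mem_map.mp hq1 with ⟨p, hp, rfl⟩
    rcases (PySem.List.mem_enumerate_iff _ _ _).mp hp with ⟨k, hk, rfl⟩
    refine ⟨k, hk, by simp, ?_⟩
    simpa using beq_iff_eq.mp hq2
  · rintro ⟨k, hk, rfl, hc⟩
    apply List.mem_map.mpr
    refine ⟨(PySem.List.sorted (edges[k]'hk) (fun x => x) false, (k : Int)), ?_, rfl⟩
    apply List.mem_filter.mpr
    constructor
    · apply List.mem_map.mpr
      exact ⟨((0 : Int) + (k : Int), edges[k]'hk), (PySem.List.mem_enumerate_iff _ _ _).mpr ⟨k, hk, rfl⟩, by simp⟩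
    · simpa using hc

theorem fold_mark_flat {α : Type} (L : List α) (g : α → List Int) (m : List Bool) :
    L.foldl (fun m x => (g x).foldl (fun m j => m.set j.toNat true) m) m
      = (L.flatMap g).foldl (fun m j => m.set j.toNat true) m := by
  induction L generalizing m with
  | nil => rfl
  | cons x L ih => simp [List.foldl_cons, List.flatMap_cons, List.foldl_append, ih]

theorem edges_else_abstract (pairs : List (Bool × List Int)) (edges : List (List Int))
    (d : PySem.Dict (List Int) (List Int))
    (hd : ∀ (c : List Int) (j : Int), j ∈ d.getD c [] ↔ ∃ (k : Nat) (h : k < edges.length),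
        j = (k : Int) ∧ PySem.List.sorted (edges[k]'h) (fun x => x) false = c) :
    pairs.foldl (fun m p =>
        if p.1 then
          (p.2.zip (PySem.List.slice p.2 (some 1) none ++ PySem.List.slice p.2 none (some 1))).foldl
            (fun m q => (d.getD (PySem.List.sorted [q.1, q.2] (fun x => x) false) []).foldl
              (fun m j => m.set j.toNat true) m) m
        else m) (List.replicate edges.length false)
      = edges.map (fun edge => PySem.Set.contains
          (pairs.foldl (fun s p => if p.1 then PySem.Set.update s (walkFace p.2) else s) PySem.Set.empty)
          (PySem.List.sorted edge (fun x => x) false)) := by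
  rw [PySem.List.foldl_if_eq_foldl_filter]
  have h1 : ∀ (m : List Bool) (p : Bool × List Int),
      (p.2.zip (PySem.List.slice p.2 (some 1) none ++ PySem.List.slice p.2 none (some 1))).foldl
          (fun m q => (d.getD (PySem.List.sorted [q.1, q.2] (fun x => x) false) []).foldl
            (fun m j => m.set j.toNat true) m) m
        = ((p.2.zip (PySem.List.slice p.2 (some 1) none ++ PySem.List.slice p.2 none (some 1))).flatMap
            (fun q => d.getD (PySem.List.sorted [q.1, q.2] (fun x => x) false) [])).foldl
            (fun m j => m.set j.toNat true) m := by
    intro m p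
    rw [fold_mark_flat]
  have h2 : (fun (m : List Bool) (p : Bool × List Int) =>
        (p.2.zip (PySem.List.slice p.2 (some 1) none ++ PySem.List.slice p.2 none (some 1))).foldl
          (fun m q => (d.getD (PySem.List.sorted [q.1, q.2] (fun x => x) false) []).foldl
            (fun m j => m.set j.toNat true) m) m)
      = (fun (m : List Bool) (p : Bool × List Int) =>
        ((p.2.zip (PySem.List.slice p.2 (some 1) none ++ PySem.List.slice p.2 none (some 1))).flatMap
            (fun q => d.getD (PySem.List.sorted [q.1, q.2] (fun x => x) false) [])).foldl
            (fun m j => m.set j.toNat true) m) := by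
    funext m p
    exact h1 m p
  rw [h2, fold_mark_flat]
  -- LHS is now one marking fold over J
  apply List.ext_getElem?
  intro i
  by_cases hi : i < edges.length
  · rw [markInt_getElem?]
    · rw [List.getElem?_map, List.getElem?_eq_getElem (l := edges) hi]
      rw [List.getElem?_replicate]
      simp only [hi, if_pos, Option.map_some, Bool.false_or]
      congr 1
      apply Bool.coe_iff_coe.mp
      simp only [decide_eq_true_eq, PySem.Set.contains_iff]
      rw [mem_sel_fold _ (fun b => walkFace b)]
      simp only [List.mem_flatMap, List.mem_filter]
      constructor
      · rintro ⟨p, ⟨hp1, hp2⟩, q, hq1, hq2⟩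
        rcases (hd _ _).mp hq2 with ⟨k, hk, hki, hkey⟩
        have hik : k = i := by exact_mod_cast hki.symm
        subst hik
        refine Or.inr ⟨p, hp1, hp2, ?_⟩
        rw [walkFace_eq]
        exact List.mem_map.mpr ⟨q, hq1, hkey.symm⟩
      · rintro (h | ⟨p, hp1, hp2, hw⟩)
        · cases h
        · rw [walkFace_eq] at hw
          rcases List.mem_map.mp hw with ⟨q, hq1, hq2⟩
          exact ⟨p, ⟨hp1, hp2⟩, q, hq1, (hd _ _).mpr ⟨i, hi, rfl, hq2.symm⟩⟩
    · intro j hj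
      rcases List.mem_flatMap.mp hj with ⟨p, _, hj2⟩
      rcases List.mem_flatMap.mp hj2 with ⟨q, _, hj3⟩
      rcases (hd _ _).mp hj3 with ⟨k, _, rfl, _⟩
      positivity
  · rw [List.getElem?_eq_none, List.getElem?_eq_none]
    · simp; omega
    · rw [markInt_length]; simp; omega

theorem verts_eq (fm : List Bool) (faces : List (List Int)) (n : Nat) :
    ((fm.zip faces).foldl (fun s p => if p.1 then PySem.Set.update s p.2 else s) PySem.Set.empty).foldl
        (fun m v => if 0 ≤ v ∧ v < (n : Int) then m.set v.toNat true else m) (List.replicate n false)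
      = (PySem.List.pyRange 0 (n : Int) 1).map
        (fun i => PySem.Set.contains ((fm.zip faces).foldl (fun s p => if p.1 then PySem.Set.update s (PySem.Set.ofList p.2) else s) PySem.Set.empty) i) := by
  have hmem : ∀ x : Int,
      (x ∈ (fm.zip faces).foldl (fun s p => if p.1 then PySem.Set.update s p.2 else s) PySem.Set.empty) ↔
      (x ∈ (fm.zip faces).foldl (fun s p => if p.1 then PySem.Set.update s (PySem.Set.ofList p.2) else s) PySem.Set.empty) := by
    intro x
    rw [mem_sel_fold _ (fun b => b), mem_sel_fold _ (fun b => PySem.Set.ofList b)]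
    simp [PySem.Set.mem_ofList]
  rw [PySem.List.foldl_ite_eq_foldl_filter]
  have len1 : (PySem.List.pyRange 0 (n : Int) 1).length = n := by simp [pysem]
  apply List.ext_getElem?
  intro i
  by_cases hi : i < n
  · rw [markInt_getElem?]
    · have hrep : (List.replicate n false)[i]? = some false := by
        simp [hi]
      have hpr : (PySem.List.pyRange 0 (n : Int) 1)[i]? = some ((i : Nat) : Int) := by
        rw [List.getElem?_eq_getElem (by omega)]
        rw [PySem.List.getElem_pyRange_one]
        simp
      rw [hrep, List.getElem?_map, hpr]
      simp only [Option.map_some]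
      congr 1
      apply Bool.coe_iff_coe.mp
      simp only [Bool.false_or, decide_eq_true_eq, List.mem_filter, PySem.Set.contains_iff,
        decide_eq_true_eq]
      rw [← hmem ((i : Nat) : Int)]
      constructor
      · rintro ⟨h1, _⟩; exact h1
      · intro h1; exact ⟨h1, by constructor <;> [positivity; exact_mod_cast hi]⟩
    · intro j hj
      rcases List.mem_filter.mp hj with ⟨_, hj2⟩
      simp at hj2
      exact hj2.1
  · rw [List.getElem?_eq_none, List.getElem?_eq_none]
    · simp [len1]; omega
    · rw [markInt_length]; simp; omega

theorem by_face_eq_alt (faces_mask : List Bool) (verts : List Int) (edges : List (List Int))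
    (faces : List (List Int)) (include_partial : Bool) :
    by_face faces_mask verts edges faces include_partial
      = by_face_alt faces_mask verts edges faces include_partial := by
  cases include_partial
  · simp only [by_face, by_face_alt, Bool.false_eq_true, if_false]
    refine Prod.ext ?_ ?_
    · exact (verts_eq faces_mask faces verts.length).symm
    · exact (edges_else_abstract (faces_mask.zip faces) edges _
        (fun c j => mem_tableGetD edges c j)).symm
  · simp only [by_face, by_face_alt, if_true]
    refine Prod.ext ?_ ?_
    · exact (verts_eq faces_mask faces verts.length).symm
    · have hm : ∀ v : Int,
          (v ∈ (faces_mask.zip faces).foldl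
            (fun s p => if p.1 then PySem.Set.update s (PySem.Set.ofList p.2) else s) ([] : PySem.Set Int))
          ↔ (v ∈ (faces_mask.zip faces).foldl
            (fun s p => if p.1 then PySem.Set.update s p.2 else s) ([] : PySem.Set Int)) := by
        intro v
        rw [mem_sel_fold _ (fun b => PySem.Set.ofList b), mem_sel_fold _ (fun b => b)]
        simp [PySem.Set.mem_ofList]
      apply List.map_congr_left
      intro edge _
      simp [List.any_eq_not_all_not, hm]

-- ===== VERDICT (by name: the statement is the Claim_ definition above) =====
theorem by_face_spec : Claim_equal_by_face := by
  intro faces_mask verts edges faces include_partial _hdom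
  unfold Spec_by_face
  exact by_face_eq_alt faces_mask verts edges faces include_partial
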